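-- pv_equiv track=rewrite | github.com/mercator-ocean/copernicus-marine-toolbox | tests/test_documentation.py | clean_documenation_utils_cli
-- ===== SOURCE A (Python) =====
-- def clean_documenation_utils_cli(
--     documentation: dict[str, str],
-- ) -> dict[str, str]:
--     def _cli_argument_to_python_argument(cli_description: str) -> str:
--         cli_description_parsed = cli_description.split("``")
--         if len(cli_description_parsed) <= 1:
--             return cli_description
--         if len(cli_description_parsed) % 2 == 0:
--             raise ValueError(
--                 f"Cannot parse CLI argument from description: {cli_description}"
--             )
--         for i in range(1, len(cli_description_parsed), 2):
--             cli_argument = cli_description_parsed[i]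
--             if "create-template" in cli_argument:
--                 continue
--             if cli_argument.startswith("--"):
--                 python_argument = cli_argument[2:].replace("-", "_")
--                 cli_description_parsed[i] = python_argument
--
--         return "``".join(cli_description_parsed)
--
--     return {
--         key.lower().replace("_help", ""): _cli_argument_to_python_argument(
--             value
--         )
--         for key, value in documentation.items()
--     }
-- ===== SOURCE B (Python) =====
-- def clean_documenation_utils_cli(
--     documentation: dict[str, str],
-- ) -> dict[str, str]:
--     def _python_name(arg: str) -> str:
--         if "create-template" in arg:
--             return arg
--         if not arg.startswith("--"):
--             return arg
--         return arg[2:].replace("-", "_")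
--
--     def _convert(description: str) -> str:
--         parts = description.split("``")
--         if len(parts) % 2 == 0:
--             raise ValueError(
--                 f"Cannot parse CLI argument from description: {description}"
--             )
--         out = parts[0]
--         rest = parts[1:]
--         while rest:
--             arg, text, rest = rest[0], rest[1], rest[2:]
--             out += "``" + _python_name(arg) + "``" + text
--         return out
--
--     return {
--         key.lower().replace("_help", ""): _convert(value)
--         for key, value in documentation.items()
--     }
-- ===== Notes on version B (the rewrite author's own statement) =====
-- stated objective: simpler
-- what changed: The inner helper no longer mutates the split list via an index loop over range(1, len, 2) and rejoins it; it validates parity once and rebuilds the string in a single pair-consuming while loop over the segments, accumulating the output directly.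
import Mathlib
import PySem

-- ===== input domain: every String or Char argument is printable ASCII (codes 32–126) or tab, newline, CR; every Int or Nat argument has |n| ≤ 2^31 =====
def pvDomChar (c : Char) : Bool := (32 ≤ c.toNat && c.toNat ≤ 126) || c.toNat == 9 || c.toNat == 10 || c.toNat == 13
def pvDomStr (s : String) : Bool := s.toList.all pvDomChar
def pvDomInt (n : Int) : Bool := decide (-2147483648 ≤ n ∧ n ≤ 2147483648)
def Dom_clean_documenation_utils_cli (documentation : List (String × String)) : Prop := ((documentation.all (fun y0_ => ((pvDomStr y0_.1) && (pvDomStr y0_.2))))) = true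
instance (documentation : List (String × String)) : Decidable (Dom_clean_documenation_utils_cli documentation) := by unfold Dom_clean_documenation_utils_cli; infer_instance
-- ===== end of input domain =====

-- B replaces A's index loop over the split list (mutate odd slots, then rejoin) by a single
-- pair-consuming loop that accumulates the rebuilt string directly (objective: simpler).

-- ===== PORT A =====
def pvSep : List Char := ['`', '`']
def pvCT : List Char := "create-template".toList
def pvDD : List Char := ['-', '-']
def pvKey (k : String) : String := PySem.Str.replace (PySem.Str.lower k) "_help" ""

-- body of A's 'for i in range(1, len(cli_description_parsed), 2)' loop
def pvStepA (ps : List (List Char)) (i : Int) : List (List Char) :=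
  let arg := PySem.List.pyGetD ps i []
  if PySem.Chars.isIn pvCT arg then ps
  else if PySem.Chars.startswith arg pvDD then
    PySem.List.pySetD ps i (PySem.Chars.replace (PySem.List.slice arg (some 2) none) ['-'] ['_'])
  else ps

def pvConvA (v : String) : String :=
  let parts := PySem.Chars.splitOn v.toList pvSep
  if parts.length ≤ 1 then v
  else if parts.length % 2 = 0 then v  -- Python raises ValueError here; excluded by Pre_
  else String.ofList (PySem.Chars.join pvSep
    ((PySem.List.pyRange 1 (PySem.List.len parts) 2).foldl pvStepA parts))

def clean_documenation_utils_cli (documentation : List (String × String)) : List (String × String) :=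
  (documentation.foldl (fun d kv => d.insert (pvKey kv.1) (pvConvA kv.2)) PySem.Dict.empty).items

-- ===== PORT B =====
def pvName (arg : List Char) : List Char :=
  if PySem.Chars.isIn pvCT arg then arg
  else if PySem.Chars.startswith arg pvDD then
    PySem.Chars.replace (PySem.List.slice arg (some 2) none) ['-'] ['_']
  else arg

-- B's 'while rest:' loop, accumulating 'out'
def pvLoopB : List Char → List (List Char) → List Char
  | out, [] => out
  | out, [_] => out  -- unreachable under Pre_ (Python's rest[1] would raise only after A raised)
  | out, a :: t :: r => pvLoopB (out ++ pvSep ++ pvName a ++ pvSep ++ t) r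

def pvConvB (v : String) : String :=
  let parts := PySem.Chars.splitOn v.toList pvSep
  if parts.length % 2 = 0 then v  -- Python raises ValueError here; excluded by Pre_
  else String.ofList (pvLoopB (parts.headD []) parts.tail)

def clean_documenation_utils_cli_alt (documentation : List (String × String)) : List (String × String) :=
  (documentation.foldl (fun d kv => d.insert (pvKey kv.1) (pvConvB kv.2)) PySem.Dict.empty).items

-- ===== PRECONDITION & SPEC =====
-- Pre_ excludes exactly the inputs on which A raises ValueError: a value containing an odd
-- number of '``' occurrences (B raises the same ValueError there).
def Pre_clean_documenation_utils_cli (documentation : List (String × String)) : Prop :=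
  ∀ p ∈ documentation, PySem.Str.count p.2 "``" % 2 = 0
instance (documentation : List (String × String)) : Decidable (Pre_clean_documenation_utils_cli documentation) := by unfold Pre_clean_documenation_utils_cli; infer_instance

def pvWitness_clean_documenation_utils_cli : (List (String × String)) :=
  [("OVERWRITE_HELP", "Use the ``--overwrite-output-data`` flag.")]

def Spec_clean_documenation_utils_cli (documentation : List (String × String)) (out : List (String × String)) : Prop := out = clean_documenation_utils_cli_alt documentation
instance (documentation : List (String × String)) (out : List (String × String)) : Decidable (Spec_clean_documenation_utils_cli documentation out) := by unfold Spec_clean_documenation_utils_cli; infer_instance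

-- ===== CLAIM (what is proved, stated in full; the proofs are below) =====
def Claim_equal_clean_documenation_utils_cli : Prop := ∀ (documentation : List (String × String)), Dom_clean_documenation_utils_cli documentation → Pre_clean_documenation_utils_cli documentation → Spec_clean_documenation_utils_cli documentation (clean_documenation_utils_cli documentation)

-- ===== LEMMAS AND PROOFS =====

-- reference count of non-overlapping '``' occurrences (proof helper)
def pvCnt : List Char → Nat
  | [] => 0
  | c :: rest =>
    if List.isPrefixOf pvSep (c :: rest) then pvCnt (List.drop 2 (c :: rest)) + 1 else pvCnt rest
  termination_by l => l.length
  decreasing_by all_goals simp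

-- what A's loop does to the split list (proof helper)
def pvOddMap : List (List Char) → List (List Char)
  | [] => []
  | [x] => [x]
  | x :: y :: r => x :: pvName y :: pvOddMap r

-- the suffix B's loop appends after its initial accumulator (proof helper)
def pvTail : List (List Char) → List Char
  | [] => []
  | [_] => []
  | a :: t :: r => pvSep ++ pvName a ++ pvSep ++ t ++ pvTail r

theorem pvSep_len : pvSep.length = 2 := rfl

theorem pvCount_go_eq (fuel : Nat) : ∀ (l : List Char) (n : Nat), l.length ≤ fuel →
    PySem.Chars.count.go pvSep fuel l n = n + pvCnt l := by
  induction fuel with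
  | zero => intro l n h; have : l = [] := by cases l <;> simp_all
            subst this; simp [PySem.Chars.count.go, pvCnt]
  | succ f ih =>
    intro l n h
    cases l with
    | nil => simp [PySem.Chars.count.go, pvCnt]
    | cons c rest =>
      rw [PySem.Chars.count.go]
      simp only [pvSep_len]
      by_cases hp : List.isPrefixOf pvSep (c :: rest)
      · simp only [hp, if_true]
        rw [ih _ _ (by simp only [List.length_drop, List.length_cons] at h ⊢; omega)]
        rw [pvCnt]; simp only [hp, if_true]; omega
      · simp only [hp, Bool.false_eq_true, if_false]
        rw [ih _ _ (by simp at h; omega)]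
        rw [pvCnt]; simp only [hp, Bool.false_eq_true, if_false]

theorem pvCount_eq (l : List Char) : PySem.Chars.count l pvSep = pvCnt l := by
  rw [PySem.Chars.count]
  simp only [show pvSep.isEmpty = false from rfl]
  simp [pvCount_go_eq l.length l 0 (le_refl _)]

theorem pvSplit_go_length (fuel : Nat) : ∀ (l cur : List Char) (acc : List (List Char)),
    l.length ≤ fuel →
    (PySem.Chars.splitOn.go pvSep fuel l cur acc).length = acc.length + 1 + pvCnt l := by
  induction fuel with
  | zero => intro l cur acc h; have : l = [] := by cases l <;> simp_all
            subst this; simp [PySem.Chars.splitOn.go, pvCnt]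
  | succ f ih =>
    intro l cur acc h
    cases l with
    | nil => simp [PySem.Chars.splitOn.go, pvCnt]
    | cons c rest =>
      rw [PySem.Chars.splitOn.go]
      simp only [pvSep_len]
      by_cases hp : List.isPrefixOf pvSep (c :: rest)
      · simp only [hp, if_true]
        rw [ih _ _ _ (by simp only [List.length_drop, List.length_cons] at h ⊢; omega)]
        rw [pvCnt]; simp only [hp, if_true]; simp; omega
      · simp only [hp, Bool.false_eq_true, if_false]
        rw [ih _ _ _ (by simp at h; omega)]
        rw [pvCnt]; simp only [hp, Bool.false_eq_true, if_false]

theorem pvSplit_go_no_sep (fuel : Nat) : ∀ (l cur : List Char) (acc : List (List Char)),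
    l.length ≤ fuel → pvCnt l = 0 →
    PySem.Chars.splitOn.go pvSep fuel l cur acc = acc.reverse ++ [cur.reverse ++ l] := by
  induction fuel with
  | zero => intro l cur acc h h0; have : l = [] := by cases l <;> simp_all
            subst this; simp [PySem.Chars.splitOn.go]
  | succ f ih =>
    intro l cur acc h h0
    cases l with
    | nil => simp [PySem.Chars.splitOn.go]
    | cons c rest =>
      rw [PySem.Chars.splitOn.go]
      by_cases hp : List.isPrefixOf pvSep (c :: rest)
      · rw [pvCnt] at h0; simp [hp] at h0
      · simp only [hp, Bool.false_eq_true, if_false]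
        rw [ih _ _ _ (by simp at h; omega) (by rw [pvCnt] at h0; simpa [hp] using h0)]
        simp

theorem pvSplit_length (l : List Char) :
    (PySem.Chars.splitOn l pvSep).length = 1 + pvCnt l := by
  rw [PySem.Chars.splitOn, pvSplit_go_length (l.length+1) l [] [] (by omega)]; simp

theorem pvSplit_no_sep (l : List Char) (h0 : pvCnt l = 0) :
    PySem.Chars.splitOn l pvSep = [l] := by
  rw [PySem.Chars.splitOn, pvSplit_go_no_sep (l.length+1) l [] [] (by omega) h0]; simp

theorem pvGetD2 {α : Type} (x y : α) (r : List α) (d : α) (n : Nat) :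
    PySem.List.pyGetD (x :: y :: r) ((n : Int) + 2) d = PySem.List.pyGetD r n d := by
  have : ((n : Int) + 2) = ((n + 2 : Nat) : Int) := by push_cast; ring
  rw [this, PySem.List.pyGetD_natCast, PySem.List.pyGetD_natCast]
  simp [List.getD]

theorem pvSetD2 {α : Type} (x y : α) (r : List α) (n : Nat) (v : α) :
    PySem.List.pySetD (x :: y :: r) ((n : Int) + 2) v = x :: y :: PySem.List.pySetD r n v := by
  simp only [PySem.List.pySetD, PySem.List.pySet?, PySem.List.pyIdx?]
  by_cases h : n < r.length
  · simp only [List.length_cons]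
    rw [if_pos (by omega), if_pos (by push_cast; omega), if_pos (by omega),
      if_pos (by exact_mod_cast h)]
    simp only [Option.map_some, Option.getD_some]
    have h2 : ((n : Int) + 2).toNat = n + 2 := by omega
    rw [h2]
    simp [List.set]
  · simp only [List.length_cons]
    rw [if_pos (by omega), if_neg (by push_cast; omega), if_pos (by omega),
      if_neg (by exact_mod_cast h)]
    simp

theorem pvGetD1 {α : Type} (x y : α) (r : List α) (d : α) :
    PySem.List.pyGetD (x :: y :: r) 1 d = y := by
  simp [PySem.List.pyGetD]

theorem pvSetD1 {α : Type} (x y : α) (r : List α) (v : α) :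
    PySem.List.pySetD (x :: y :: r) 1 v = x :: v :: r := by
  simp [PySem.List.pySetD, PySem.List.pySet?, PySem.List.pyIdx?]

theorem pvStepA_shift (x y : List Char) (r : List (List Char)) (n : Nat) :
    pvStepA (x :: y :: r) ((n : Int) + 2) = x :: y :: pvStepA r n := by
  unfold pvStepA
  dsimp only
  rw [pvGetD2]
  split_ifs
  · rfl
  · rw [pvSetD2]
  · rfl

theorem pvStepA_one (x y : List Char) (r : List (List Char)) :
    pvStepA (x :: y :: r) 1 = x :: pvName y :: r := by
  unfold pvStepA pvName
  dsimp only
  rw [pvGetD1]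
  split_ifs
  · rfl
  · rw [pvSetD1]
  · rfl

theorem pvFoldl_shift (idxs : List Int) (h : ∀ i ∈ idxs, ∃ n : Nat, i = (n : Int))
    (x y : List Char) : ∀ (r : List (List Char)),
    (idxs.map (· + 2)).foldl pvStepA (x :: y :: r) = x :: y :: idxs.foldl pvStepA r := by
  induction idxs with
  | nil => intro r; simp
  | cons i is ih =>
    intro r
    obtain ⟨n, rfl⟩ := h i (List.mem_cons_self)
    simp only [List.map_cons, List.foldl_cons, pvStepA_shift]
    exact ih (fun j hj => h j (List.mem_cons_of_mem _ hj)) _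

theorem pvRange_odd (n : Nat) (h : n % 2 = 1) :
    PySem.List.pyRange 1 (n : Int) 2 = (List.range (n / 2)).map (fun k : Nat => (1 : Int) + 2 * (k : Int)) := by
  rw [PySem.List.pyRange_of_pos 1 (n : Int) (by norm_num)]
  by_cases h1 : (1 : Int) < (n : Int)
  · rw [if_pos h1]
    rw [show ((n : Int) - 1 + 2 - 1) = (n : Int) from by ring]
    rw [show ((n : Int) / 2).toNat = n / 2 from by omega]
  · rw [if_neg h1]
    have : n = 1 := by omega
    subst this
    rfl

theorem pvFoldl_oddMap (ps : List (List Char)) (h : ps.length % 2 = 1) :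
    ((List.range (ps.length / 2)).map (fun k : Nat => (1 : Int) + 2 * (k : Int))).foldl pvStepA ps = pvOddMap ps := by
  induction ps using pvOddMap.induct with
  | case1 => simp at h
  | case2 x => simp [pvOddMap]
  | case3 x y r ih =>
    have hr : r.length % 2 = 1 := by simp at h; omega
    have hlen : (x :: y :: r).length / 2 = r.length / 2 + 1 := by simp; omega
    rw [hlen, List.range_succ_eq_map]
    simp only [List.map_cons, Nat.cast_zero, mul_zero, add_zero, List.foldl_cons, List.map_map]
    rw [pvStepA_one]
    have hmap : ((List.range (r.length / 2)).map ((fun k : Nat => (1 : Int) + 2 * (k : Int)) ∘ (· + 1)))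
        = ((List.range (r.length / 2)).map (fun k : Nat => (1 : Int) + 2 * (k : Int))).map (· + 2) := by
      rw [List.map_map]
      apply List.map_congr_left
      intro k _
      simp
      ring
    rw [hmap, pvFoldl_shift _ (fun i hi => by
      simp only [List.mem_map, List.mem_range] at hi
      obtain ⟨k, _, rfl⟩ := hi
      exact ⟨1 + 2 * k, by push_cast; ring⟩)]
    rw [ih hr, pvOddMap]

theorem pvLoopB_eq (r : List (List Char)) : ∀ (out : List Char),
    pvLoopB out r = out ++ pvTail r := by
  induction r using pvTail.induct with
  | case1 => intro out; rw [pvLoopB, pvTail]; simp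
  | case2 x => intro out; rw [pvLoopB, pvTail]; simp
  | case3 a t r ih =>
    intro out
    rw [pvLoopB, pvTail, ih]
    simp

theorem pvJoin_oddMap (r : List (List Char)) : ∀ (x : List Char), r.length % 2 = 0 →
    PySem.Chars.join pvSep (pvOddMap (x :: r)) = x ++ pvTail r := by
  induction r using pvTail.induct with
  | case1 => intro x _; rw [pvOddMap, pvTail]; simp [PySem.Chars.join_singleton]
  | case2 a => intro x h; simp at h
  | case3 a t r ih =>
    intro x h
    have hr : r.length % 2 = 0 := by simp at h; omega
    have h1 : pvOddMap (x :: a :: t :: r) = x :: pvName a :: pvOddMap (t :: r) := by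
      rw [pvOddMap]
    have h2 : ∃ zs, pvOddMap (t :: r) = t :: zs := by
      cases r with
      | nil => exact ⟨[], by rw [pvOddMap]⟩
      | cons u r' => exact ⟨pvName u :: pvOddMap r', by rw [pvOddMap]⟩
    obtain ⟨zs, hzs⟩ := h2
    rw [h1, hzs, PySem.Chars.join_cons_cons, PySem.Chars.join_cons_cons, ← hzs, ih t hr, pvTail]
    simp

theorem pvConv_eq (v : String) (h : PySem.Str.count v "``" % 2 = 0) :
    pvConvA v = pvConvB v := by
  have hc : pvCnt v.toList % 2 = 0 := by
    rw [← pvCount_eq]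
    have : PySem.Str.count v "``" = PySem.Chars.count v.toList pvSep := by
      simp [pvSep]
    rw [← this]
    exact h
  unfold pvConvA pvConvB
  have hlen : (PySem.Chars.splitOn v.toList pvSep).length = 1 + pvCnt v.toList :=
    pvSplit_length v.toList
  have hodd : (PySem.Chars.splitOn v.toList pvSep).length % 2 = 1 := by omega
  rw [if_neg (by omega : ¬ (PySem.Chars.splitOn v.toList pvSep).length % 2 = 0)]
  by_cases hle : (PySem.Chars.splitOn v.toList pvSep).length ≤ 1
  · rw [if_pos hle]
    have h0 : pvCnt v.toList = 0 := by omega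
    rw [pvSplit_no_sep v.toList h0]
    simp [pvLoopB, String.ofList_toList]
  · rw [if_neg hle, if_neg (by omega : ¬ (PySem.Chars.splitOn v.toList pvSep).length % 2 = 0)]
    rw [PySem.List.len_eq, pvRange_odd _ hodd, pvFoldl_oddMap _ hodd]
    cases hp : PySem.Chars.splitOn v.toList pvSep with
    | nil => rw [hp] at hlen; exact absurd hlen (by simp; omega)
    | cons p0 rest =>
      have hr : rest.length % 2 = 0 := by rw [hp] at hodd; simp at hodd; omega
      rw [pvJoin_oddMap rest p0 hr]
      simp [pvLoopB_eq]

-- ===== VERDICT (by name: the statement is the Claim_ definition above) =====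
theorem clean_documenation_utils_cli_spec : Claim_equal_clean_documenation_utils_cli := by
  intro doc _ hpre
  unfold Spec_clean_documenation_utils_cli clean_documenation_utils_cli clean_documenation_utils_cli_alt
  rw [PySem.List.foldl_congr_mem doc _ _ _ (fun acc kv hkv => by
    rw [pvConv_eq kv.2 (hpre kv hkv)])]
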